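-- pv_equiv track=rewrite | github.com/qeedquan/challenges | codegolf/knuths-power-tree.py | mktree
-- ===== SOURCE A (Python) =====
-- def chain(tree, x):
--     c = [x]
--     while x != 1:
--         x = tree[x]
--         c.append(x)
--     return c[::-1]
--
-- def mktree(levels):
--     tree = {1: None}
--     leaves = [1]
--     for _ in range(levels):
--         newleaves = []
--         for m in leaves:
--             for i in chain(tree, m):
--                 if i+m not in tree:
--                     tree[i+m] = m
--                     newleaves.append(i+m)
--         leaves = newleaves
--     return tree
-- ===== SOURCE B (Python) =====
-- def mktree(levels):
--     # Frontier holds each leaf's full root-to-leaf chain, so no `chain` helper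
--     # (no walking parent pointers back up the tree) is needed.
--     tree = {1: None}
--     frontier = [[1]]
--     for _ in range(levels):
--         newfrontier = []
--         for c in frontier:
--             m = c[-1]
--             for i in c:
--                 if i + m not in tree:
--                     tree[i + m] = m
--                     newfrontier.append(c + [i + m])
--         frontier = newfrontier
--     return tree
-- ===== Notes on version B (the rewrite author's own statement) =====
-- stated objective: alternative
-- what changed: The BFS frontier carries each leaf's full root-to-leaf chain forward as accumulated state, eliminating the chain() helper that recomputed every chain by walking parent pointers back up the dict.
import Mathlib
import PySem

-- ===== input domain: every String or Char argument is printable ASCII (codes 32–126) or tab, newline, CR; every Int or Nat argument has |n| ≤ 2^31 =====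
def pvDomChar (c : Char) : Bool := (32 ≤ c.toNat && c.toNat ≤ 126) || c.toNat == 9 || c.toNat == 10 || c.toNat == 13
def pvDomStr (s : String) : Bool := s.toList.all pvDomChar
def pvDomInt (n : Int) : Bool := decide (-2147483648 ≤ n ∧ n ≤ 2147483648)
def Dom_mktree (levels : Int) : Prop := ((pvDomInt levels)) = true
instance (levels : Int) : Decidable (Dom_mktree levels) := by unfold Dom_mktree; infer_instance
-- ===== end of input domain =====

-- B replaces A's chain() helper (which walks parent pointers back up the dict for every
-- leaf) by carrying each leaf's root-to-leaf chain forward in the BFS frontier itself.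

-- ===== PORT A =====
-- chain(tree, x): the while loop, with fuel x.toNat+1 as a pure totality guard (the walk
-- strictly decreases through values ≥ 1, so the fuel is never exhausted on reachable trees;
-- on a missing/None parent Python would raise, the port stops — unreachable in mktree).
def chainGo (tree : PySem.Dict Int (Option Int)) : Nat → Int → List Int → List Int
  | 0, _, c => c
  | fuel+1, x, c =>
    if x = 1 then c
    else
      match PySem.Dict.get? tree x with
      | some (some y) => chainGo tree fuel y (c ++ [y])
      | _ => c

-- c[::-1] is List.reverse (PySem.List.slice?_none_none_neg_one)
def chainA (tree : PySem.Dict Int (Option Int)) (x : Int) : List Int :=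
  (chainGo tree (x.toNat + 1) x [x]).reverse

-- body of `for i in chain(tree, m): if i+m not in tree: …`
def stepA (m : Int) (t : PySem.Dict Int (Option Int) × List Int) (i : Int) :
    PySem.Dict Int (Option Int) × List Int :=
  if PySem.Dict.contains t.1 (i + m) = false then
    (PySem.Dict.insert t.1 (i + m) (some m), t.2 ++ [i + m])
  else t

-- body of `for m in leaves: …`
def leafA (s : PySem.Dict Int (Option Int) × List Int) (m : Int) :
    PySem.Dict Int (Option Int) × List Int :=
  (chainA s.1 m).foldl (stepA m) s

-- one iteration of `for _ in range(levels)`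
def levelA (st : PySem.Dict Int (Option Int) × List Int) :
    PySem.Dict Int (Option Int) × List Int :=
  st.2.foldl leafA (st.1, [])

def mktree (levels : Int) : List (Int × Option Int) :=
  (((PySem.List.pyRange 0 levels 1).foldl (fun st _ => levelA st)
      (PySem.Dict.ofList [(1, none)], [1])).1).items

-- ===== PORT B =====
-- body of `for i in c: if i+m not in tree: …` (appends the extended chain)
def stepB (c : List Int) (m : Int) (t : PySem.Dict Int (Option Int) × List (List Int)) (i : Int) :
    PySem.Dict Int (Option Int) × List (List Int) :=
  if PySem.Dict.contains t.1 (i + m) = false then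
    (PySem.Dict.insert t.1 (i + m) (some m), t.2 ++ [c ++ [i + m]])
  else t

-- body of `for c in frontier: m = c[-1]; …` (c[-1] on an empty list would raise in Python;
-- frontier chains are never empty, the `none` branch is unreachable)
def chainB (s : PySem.Dict Int (Option Int) × List (List Int)) (c : List Int) :
    PySem.Dict Int (Option Int) × List (List Int) :=
  match c.getLast? with
  | none => s
  | some m => c.foldl (stepB c m) s

-- one iteration of `for _ in range(levels)`
def levelB (st : PySem.Dict Int (Option Int) × List (List Int)) :
    PySem.Dict Int (Option Int) × List (List Int) :=
  st.2.foldl chainB (st.1, [])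

def mktree_alt (levels : Int) : List (Int × Option Int) :=
  (((PySem.List.pyRange 0 levels 1).foldl (fun st _ => levelB st)
      (PySem.Dict.ofList [(1, none)], [[1]])).1).items

-- ===== PRECONDITION & SPEC =====
def Spec_mktree (levels : Int) (out : List (Int × Option Int)) : Prop := out = mktree_alt levels
instance (levels : Int) (out : List (Int × Option Int)) : Decidable (Spec_mktree levels out) := by unfold Spec_mktree; infer_instance

-- ===== CLAIM (what is proved, stated in full; the proofs are below) =====
def Claim_equal_mktree : Prop := ∀ (levels : Int), Dom_mktree levels → Spec_mktree levels (mktree levels)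

-- ===== LEMMAS AND PROOFS =====

-- leaf of a chain (c[-1], defaulted; chains are nonempty wherever this is used)
def lastF (c : List Int) : Int := (c.getLast?).getD 0

-- r is a valid leaf-to-root parent chain in tree: consecutive parent links, values
-- strictly decreasing and ≥ 1, ending at the root 1.
def ValidR (tree : PySem.Dict Int (Option Int)) : List Int → Prop
  | [] => False
  | [x] => x = 1
  | x :: y :: r => PySem.Dict.get? tree x = some (some y) ∧ 1 ≤ y ∧ y < x ∧ ValidR tree (y :: r)

-- tree only grows (fresh-key inserts): every existing binding is preserved
def SubD (d d' : PySem.Dict Int (Option Int)) : Prop :=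
  ∀ k v, PySem.Dict.get? d k = some v → PySem.Dict.get? d' k = some v

theorem subD_refl (d : PySem.Dict Int (Option Int)) : SubD d d := fun _ _ h => h

theorem subD_trans {d₁ d₂ d₃ : PySem.Dict Int (Option Int)} (h₁ : SubD d₁ d₂) (h₂ : SubD d₂ d₃) :
    SubD d₁ d₃ := fun k v h => h₂ k v (h₁ k v h)

theorem subD_insert {d : PySem.Dict Int (Option Int)} {k : Int} {v : Option Int}
    (h : PySem.Dict.contains d k = false) : SubD d (PySem.Dict.insert d k v) := by
  intro j w hj
  rcases eq_or_ne j k with rfl | hne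
  · rw [(PySem.Dict.get?_eq_none_iff_contains d j).2 h] at hj; cases hj
  · rw [PySem.Dict.get?_insert, if_neg hne]; exact hj

theorem validR_mono {d d' : PySem.Dict Int (Option Int)} (hs : SubD d d') :
    ∀ r, ValidR d r → ValidR d' r := by
  intro r
  induction r with
  | nil => simp [ValidR]
  | cons x t ih =>
    cases t with
    | nil => simp [ValidR]
    | cons y t' =>
      intro h
      obtain ⟨h1, h2, h3, h4⟩ := h
      exact ⟨hs _ _ h1, h2, h3, ih h4⟩

theorem validR_all_pos {d : PySem.Dict Int (Option Int)} :
    ∀ r, ValidR d r → ∀ i ∈ r, 1 ≤ i := by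
  intro r
  induction r with
  | nil => simp
  | cons x t ih =>
    cases t with
    | nil =>
      intro h i hi
      simp only [List.mem_singleton] at hi
      simp only [ValidR] at h; omega
    | cons y t' =>
      intro h i hi
      obtain ⟨h1, h2, h3, h4⟩ := h
      rcases List.mem_cons.1 hi with rfl | hi'
      · omega
      · exact ih h4 i hi'

theorem validR_len {d : PySem.Dict Int (Option Int)} :
    ∀ (r : List Int) (x : Int), ValidR d (x :: r) → (r.length : Int) ≤ x - 1 := by
  intro r
  induction r with
  | nil => intro x h; simp only [ValidR] at h; simp; omega
  | cons y r' ih =>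
    intro x h
    obtain ⟨h1, h2, h3, h4⟩ := h
    have := ih y h4
    simp only [List.length_cons]
    push_cast
    omega

theorem chainGo_spec {d : PySem.Dict Int (Option Int)} :
    ∀ (r : List Int) (x : Int) (acc : List Int) (fuel : Nat),
      ValidR d (x :: r) → r.length ≤ fuel → chainGo d fuel x acc = acc ++ r := by
  intro r
  induction r with
  | nil =>
    intro x acc fuel h _
    simp only [ValidR] at h
    subst h
    cases fuel <;> simp [chainGo]
  | cons y r' ih =>
    intro x acc fuel h hf
    obtain ⟨h1, h2, h3, h4⟩ := h
    cases fuel with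
    | zero => simp at hf
    | succ f =>
      have hx1 : x ≠ 1 := by omega
      simp only [chainGo, if_neg hx1, h1]
      rw [ih y (acc ++ [y]) f h4 (by simpa using hf)]
      simp

theorem chainA_eq {d : PySem.Dict Int (Option Int)} {x : Int} {r : List Int}
    (h : ValidR d (x :: r)) : chainA d x = (x :: r).reverse := by
  have hlen : (r.length : Int) ≤ x - 1 := validR_len r x h
  have hx : 1 ≤ x := validR_all_pos _ h x (by simp)
  have : r.length ≤ x.toNat + 1 := by omega
  unfold chainA
  rw [chainGo_spec r x [x] (x.toNat + 1) h this]
  simp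

-- one chain's inner loop: A over the recomputed chain and B over the carried chain walk
-- the same list and keep the two states in lockstep
theorem inner_eq (c : List Int) (m : Int) :
    ∀ (l : List Int) (d : PySem.Dict Int (Option Int)) (nA : List Int) (nB : List (List Int)),
      (∀ i ∈ l, 1 ≤ i) →
      c.reverse.head? = some m →
      1 ≤ m →
      ValidR d c.reverse →
      (∀ c' ∈ nB, ValidR d c'.reverse) →
      nA = nB.map lastF →
      (l.foldl (stepA m) (d, nA)).1 = (l.foldl (stepB c m) (d, nB)).1 ∧
      (l.foldl (stepA m) (d, nA)).2 = (l.foldl (stepB c m) (d, nB)).2.map lastF ∧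
      SubD d (l.foldl (stepA m) (d, nA)).1 ∧
      (∀ c' ∈ (l.foldl (stepB c m) (d, nB)).2, ValidR (l.foldl (stepA m) (d, nA)).1 c'.reverse) := by
  intro l
  induction l with
  | nil =>
    intro d nA nB _ _ _ _ hnB hmap
    exact ⟨rfl, hmap, subD_refl d, hnB⟩
  | cons i l' ih =>
    intro d nA nB hpos hhead hm hc hnB hmap
    have hi : 1 ≤ i := hpos i (by simp)
    have hpos' : ∀ j ∈ l', 1 ≤ j := fun j hj => hpos j (by simp [hj])
    simp only [List.foldl_cons]
    by_cases hcon : PySem.Dict.contains d (i + m) = false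
    · -- fresh key: both insert, A records the new leaf, B the extended chain
      have hsub : SubD d (PySem.Dict.insert d (i + m) (some m)) := subD_insert hcon
      have hA : stepA m (d, nA) i = (PySem.Dict.insert d (i + m) (some m), nA ++ [i + m]) := by
        simp [stepA, hcon]
      have hB : stepB c m (d, nB) i =
          (PySem.Dict.insert d (i + m) (some m), nB ++ [c ++ [i + m]]) := by
        simp [stepB, hcon]
      rw [hA, hB]
      obtain ⟨rest, hrev⟩ : ∃ rest, c.reverse = m :: rest := by
        cases hcr : c.reverse with
        | nil => rw [hcr] at hhead; cases hhead
        | cons a t => rw [hcr] at hhead; simp at hhead; exact ⟨t, by rw [hhead]⟩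
      have hvalnew : ValidR (PySem.Dict.insert d (i + m) (some m)) (c ++ [i + m]).reverse := by
        rw [List.reverse_append, List.reverse_singleton, List.singleton_append, hrev]
        exact ⟨PySem.Dict.get?_insert_self _ _ _, hm, by omega,
          validR_mono hsub _ (hrev ▸ hc)⟩
      have := ih (PySem.Dict.insert d (i + m) (some m)) (nA ++ [i + m]) (nB ++ [c ++ [i + m]])
        hpos' hhead hm (validR_mono hsub _ hc)
        (by
          intro c' hc'
          rcases List.mem_append.1 hc' with h' | h'
          · exact validR_mono hsub _ (hnB c' h')
          · simp only [List.mem_singleton] at h'; subst h'; exact hvalnew)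
        (by simp [hmap, lastF])
      exact ⟨this.1, this.2.1, subD_trans hsub this.2.2.1, this.2.2.2⟩
    · -- key present: both states unchanged
      have hA : stepA m (d, nA) i = (d, nA) := by simp [stepA, hcon]
      have hB : stepB c m (d, nB) i = (d, nB) := by simp [stepB, hcon]
      rw [hA, hB]
      exact ih d nA nB hpos' hhead hm hc hnB hmap

-- one whole level: A's fold over the leaves equals B's fold over the frontier chains
theorem mid_eq :
    ∀ (fr : List (List Int)) (d : PySem.Dict Int (Option Int)) (nA : List Int)
      (nB : List (List Int)),
      (∀ c ∈ fr, ValidR d c.reverse) →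
      (∀ c' ∈ nB, ValidR d c'.reverse) →
      nA = nB.map lastF →
      ((fr.map lastF).foldl leafA (d, nA)).1 = (fr.foldl chainB (d, nB)).1 ∧
      ((fr.map lastF).foldl leafA (d, nA)).2 = (fr.foldl chainB (d, nB)).2.map lastF ∧
      SubD d ((fr.map lastF).foldl leafA (d, nA)).1 ∧
      (∀ c' ∈ (fr.foldl chainB (d, nB)).2,
        ValidR ((fr.map lastF).foldl leafA (d, nA)).1 c'.reverse) := by
  intro fr
  induction fr with
  | nil =>
    intro d nA nB _ hnB hmap
    exact ⟨rfl, hmap, subD_refl d, hnB⟩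
  | cons c fr' ih =>
    intro d nA nB hfr hnB hmap
    have hc : ValidR d c.reverse := hfr c (by simp)
    obtain ⟨rest, hrev⟩ : ∃ rest, c.reverse = lastF c :: rest := by
      cases hcr : c.reverse with
      | nil => rw [hcr] at hc; cases hc
      | cons a t =>
        refine ⟨t, ?_⟩
        have : c.getLast? = some a := by
          rw [← List.head?_reverse, hcr]; rfl
        simp [lastF, this]
    set m := lastF c with hmdef
    have hhead : c.reverse.head? = some m := by rw [hrev]; rfl
    have hm : 1 ≤ m := validR_all_pos _ hc m (by rw [hrev]; simp)
    have hgl : c.getLast? = some m := by rw [← List.head?_reverse]; exact hhead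
    have hchainB : chainB (d, nB) c = c.foldl (stepB c m) (d, nB) := by
      simp [chainB, hgl]
    have hchainA : leafA (d, nA) m = c.foldl (stepA m) (d, nA) := by
      have : chainA d m = c := by
        rw [chainA_eq (hrev ▸ hc)]
        rw [← hrev, List.reverse_reverse]
      simp [leafA, this]
    have hposc : ∀ i ∈ c, 1 ≤ i := by
      intro i hi
      exact validR_all_pos _ hc i (by simp [hi])
    simp only [List.map_cons, List.foldl_cons]
    rw [hchainA, hchainB]
    have hin := inner_eq c m c d nA nB hposc hhead hm hc hnB hmap
    obtain ⟨h1, h2, h3, h4⟩ := hin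
    set rA := c.foldl (stepA m) (d, nA) with hrA
    set rB := c.foldl (stepB c m) (d, nB) with hrB
    have hfr' : ∀ c' ∈ fr', ValidR rA.1 c'.reverse := by
      intro c' hc'
      exact validR_mono h3 _ (hfr c' (by simp [hc']))
    have hres := ih rA.1 rA.2 rB.2 hfr' h4 h2
    have hAeta : (rA.1, rA.2) = rA := rfl
    have hBeta : (rA.1, rB.2) = rB := by
      rw [h1]
    rw [hAeta, hBeta] at hres
    exact ⟨hres.1, hres.2.1, subD_trans h3 hres.2.2.1, hres.2.2.2⟩

-- the outer `for _ in range(levels)` loop keeps the two states in lockstep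
theorem outer_eq :
    ∀ (ticks : List Int) (d : PySem.Dict Int (Option Int)) (lv : List Int)
      (fr : List (List Int)),
      (∀ c ∈ fr, ValidR d c.reverse) →
      lv = fr.map lastF →
      (ticks.foldl (fun st _ => levelA st) (d, lv)).1 =
        (ticks.foldl (fun st _ => levelB st) (d, fr)).1 ∧
      (ticks.foldl (fun st _ => levelA st) (d, lv)).2 =
        (ticks.foldl (fun st _ => levelB st) (d, fr)).2.map lastF ∧
      (∀ c' ∈ (ticks.foldl (fun st _ => levelB st) (d, fr)).2,
        ValidR (ticks.foldl (fun st _ => levelA st) (d, lv)).1 c'.reverse) := by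
  intro ticks
  induction ticks with
  | nil =>
    intro d lv fr hfr hmap
    exact ⟨rfl, hmap, hfr⟩
  | cons t ticks' ih =>
    intro d lv fr hfr hmap
    simp only [List.foldl_cons]
    have hlv : levelA (d, lv) = (fr.map lastF).foldl leafA (d, []) := by
      simp [levelA, hmap]
    have hfrB : levelB (d, fr) = fr.foldl chainB (d, []) := by simp [levelB]
    rw [hlv, hfrB]
    have hmid := mid_eq fr d [] [] hfr (by simp) (by simp)
    obtain ⟨h1, h2, h3, h4⟩ := hmid
    set rA := (fr.map lastF).foldl leafA (d, ([] : List Int)) with hrA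
    set rB := fr.foldl chainB (d, ([] : List (List Int))) with hrB
    have := ih rA.1 rA.2 rB.2 h4 h2
    have hAeta : (rA.1, rA.2) = rA := rfl
    have hBeta : (rA.1, rB.2) = rB := by rw [h1]
    rw [hAeta, hBeta] at this
    exact this

-- ===== VERDICT (by name: the statement is the Claim_ definition above) =====
theorem mktree_spec : Claim_equal_mktree := by
  intro levels _
  unfold Spec_mktree mktree mktree_alt
  have h := outer_eq (PySem.List.pyRange 0 levels 1) (PySem.Dict.ofList [(1, none)])
    [1] [[1]]
    (by
      intro c hc
      simp only [List.mem_singleton] at hc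
      subst hc
      simp [ValidR])
    (by simp [lastF])
  rw [h.1]
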